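-- pv_equiv track=rewrite | github.com/razzaksr/Nitte-Mine-July2025 | day4/array_sum_solutions.py | count_xor_pairs
-- ===== SOURCE A (Python) =====
-- from collections import defaultdict, Counter
-- from typing import List, Dict, Set
--
-- def count_xor_pairs(arr: List[int], target: int) -> int:
--     """
--     Count pairs with XOR equal to target.
--     Time: O(n), Space: O(n)
--     """
--     freq = Counter(arr)
--     count = 0
--
--     for num in freq:
--         xor_pair = num ^ target
--         if xor_pair in freq:
--             if num == xor_pair:
--                 # Same number, choose 2 from frequency
--                 count += freq[num] * (freq[num] - 1) // 2
--             elif num < xor_pair: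
--                 # Avoid double counting
--                 count += freq[num] * freq[xor_pair]
--
--     return count
-- ===== SOURCE B (Python) =====
-- from collections import Counter
-- from typing import List
--
-- def count_xor_pairs(arr: List[int], target: int) -> int:
--     # Single pass: pair each element with previously seen complements.
--     count = 0
--     seen = Counter()
--     for num in arr:
--         count += seen[num ^ target]
--         seen[num] += 1
--     return count
-- ===== Notes on version B (the rewrite author's own statement) =====
-- stated objective: simpler
-- what changed: Replaced A's two-phase distinct-key scheme (build full Counter, then iterate distinct keys with equal-value C(k,2) and num<xor_pair double-count guards) by a single left-to-right pass that adds, for each element, the number of previously seen complements num^target and then records the element; no case analysis at all.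
import Mathlib
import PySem

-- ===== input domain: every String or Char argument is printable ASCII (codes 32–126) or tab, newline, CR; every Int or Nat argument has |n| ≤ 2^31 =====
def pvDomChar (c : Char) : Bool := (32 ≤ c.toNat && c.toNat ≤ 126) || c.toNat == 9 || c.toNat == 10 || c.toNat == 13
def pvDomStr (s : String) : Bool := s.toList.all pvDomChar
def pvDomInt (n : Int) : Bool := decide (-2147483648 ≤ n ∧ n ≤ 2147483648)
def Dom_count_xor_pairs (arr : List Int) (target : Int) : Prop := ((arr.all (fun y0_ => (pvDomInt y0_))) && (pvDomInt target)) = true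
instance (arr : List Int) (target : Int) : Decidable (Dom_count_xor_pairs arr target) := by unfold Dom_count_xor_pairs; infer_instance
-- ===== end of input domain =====

-- B replaces A's two-phase distinct-key scheme (full Counter, then per-key C(k,2) / num<xor_pair guards)
-- by a single left-to-right pass pairing each element with previously seen complements (objective: simpler).

-- ===== PORT A =====
def count_xor_pairs (arr : List Int) (target : Int) : Int :=
  let freq := PySem.Dict.counter arr
  freq.keys.foldl (fun count num =>
    let xor_pair := PySem.Int.bxor num target
    if freq.contains xor_pair then
      if num = xor_pair then
        count + PySem.Int.floordiv (freq.getD num 0 * (freq.getD num 0 - 1)) 2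
      else if num < xor_pair then
        count + freq.getD num 0 * freq.getD xor_pair 0
      else count
    else count) 0

-- ===== PORT B =====
def count_xor_pairs_alt (arr : List Int) (target : Int) : Int :=
  (arr.foldl (fun (st : Int × PySem.Dict Int Int) num =>
      (st.1 + st.2.getD (PySem.Int.bxor num target) 0, st.2.modify num 0 (fun v => v + 1)))
    (0, PySem.Dict.empty)).1

-- ===== PRECONDITION & SPEC =====
def Spec_count_xor_pairs (arr : List Int) (target : Int) (out : Int) : Prop := out = count_xor_pairs_alt arr target
instance (arr : List Int) (target : Int) (out : Int) : Decidable (Spec_count_xor_pairs arr target out) := by unfold Spec_count_xor_pairs; infer_instance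

-- ===== CLAIM (what is proved, stated in full; the proofs are below) =====
def Claim_equal_count_xor_pairs : Prop := ∀ (arr : List Int) (target : Int), Dom_count_xor_pairs arr target → Spec_count_xor_pairs arr target (count_xor_pairs arr target)

-- ===== LEMMAS AND PROOFS =====

-- xor cancellation, Python-exact bxor
lemma pv_bxor_cancel (a b : Int) : PySem.Int.bxor (PySem.Int.bxor a b) b = a := by
  unfold PySem.Int.bxor
  by_cases ha : 0 ≤ a <;> by_cases hb : 0 ≤ b
  · rw [if_pos ha, if_pos hb,
      if_pos (Int.natCast_nonneg _), if_pos hb]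
    simp [Int.toNat_of_nonneg ha]
  · rw [if_pos ha, if_neg hb,
      if_neg (by have := Int.natCast_nonneg (a.toNat ^^^ (-b - 1).toNat); omega), if_neg hb]
    have h1 : -(-(↑(a.toNat ^^^ (-b - 1).toNat) : Int) - 1) - 1 = ↑(a.toNat ^^^ (-b - 1).toNat) := by ring
    rw [h1]
    simp [Int.toNat_of_nonneg ha]
  · rw [if_neg ha, if_pos hb,
      if_neg (by have := Int.natCast_nonneg ((-a - 1).toNat ^^^ b.toNat); omega), if_pos hb]
    have h1 : -(-(↑((-a - 1).toNat ^^^ b.toNat) : Int) - 1) - 1 = ↑((-a - 1).toNat ^^^ b.toNat) := by ring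
    rw [h1]
    simp
    omega
  · rw [if_neg ha, if_neg hb,
      if_pos (Int.natCast_nonneg _), if_neg hb]
    simp
    omega

lemma pv_bxor_eq_comm (k a t : Int) : k = PySem.Int.bxor a t ↔ a = PySem.Int.bxor k t := by
  constructor
  · rintro rfl; exact (pv_bxor_cancel a t).symm
  · rintro rfl; exact (pv_bxor_cancel k t).symm

lemma pv_bxor_eq_self (a t : Int) : a = PySem.Int.bxor a t ↔ t = 0 := by
  constructor
  · intro h
    have h1 : PySem.Int.bxor (PySem.Int.bxor t a) a = t := pv_bxor_cancel t a
    rw [PySem.Int.bxor_comm t a, ← h] at h1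
    rw [← h1, PySem.Int.bxor_self]
  · rintro rfl; rw [PySem.Int.bxor_zero]

lemma pv_fd_step (c : Int) :
    PySem.Int.floordiv ((c + 1) * c) 2 = PySem.Int.floordiv (c * (c - 1)) 2 + c := by
  obtain ⟨m, hm⟩ := Int.even_mul_succ_self (c - 1)
  have e1 : (c - 1) * (c - 1 + 1) = c * (c - 1) := by ring
  rw [e1] at hm
  have e2 : (c + 1) * c = c * (c - 1) + (c + c) := by ring
  rw [e2, hm, PySem.Int.floordiv_eq_ediv_of_pos (by norm_num),
    PySem.Int.floordiv_eq_ediv_of_pos (by norm_num)]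
  omega

-- reference count: pairs (i < j) with arr[i] xor arr[j] = t, attributed to the first element
def pvPC (t : Int) : List Int → Int
  | [] => 0
  | x :: xs => (xs.count (PySem.Int.bxor x t) : Int) + pvPC t xs

lemma pvPC_append (t : Int) (p : List Int) (a : Int) :
    pvPC t (p ++ [a]) = pvPC t p + (p.count (PySem.Int.bxor a t) : Int) := by
  induction p with
  | nil => simp [pvPC]
  | cons x xs ih =>
    have hiff : PySem.Int.bxor x t = a ↔ PySem.Int.bxor a t = x := by
      rw [eq_comm, pv_bxor_eq_comm, eq_comm]
    have hiff2 : a = PySem.Int.bxor x t ↔ x = PySem.Int.bxor a t :=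
      ⟨fun h => (hiff.mp h.symm).symm, fun h => (hiff.mpr h.symm).symm⟩
    simp only [List.cons_append, pvPC, ih, List.count_append, List.count_cons,
      List.count_nil, beq_iff_eq]
    by_cases h1 : a = PySem.Int.bxor x t
    · rw [if_pos h1, if_pos (hiff2.mp h1)]
      push_cast; ring
    · rw [if_neg h1, if_neg (fun hh => h1 (hiff2.mpr hh))]
      push_cast; ring

-- the per-distinct-key summand of A, phrased over list counts
def pvTerm (p : List Int) (t k : Int) : Int :=
  if PySem.Int.bxor k t ∈ p then
    if k = PySem.Int.bxor k t then
      PySem.Int.floordiv ((p.count k : Int) * ((p.count k : Int) - 1)) 2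
    else if k < PySem.Int.bxor k t then
      (p.count k : Int) * (p.count (PySem.Int.bxor k t) : Int)
    else 0
  else 0

def pvSum (p : List Int) (t : Int) : Int := ((PySem.List.dedup p).map (pvTerm p t)).sum

lemma pvTerm_not_mem (p : List Int) (t a : Int) (ha : a ∉ p) : pvTerm p t a = 0 := by
  simp only [pvTerm]
  by_cases hb : PySem.Int.bxor a t ∈ p
  · have hne : a ≠ PySem.Int.bxor a t := fun h => ha (h ▸ hb)
    have hc : p.count a = 0 := List.count_eq_zero.mpr ha
    rw [if_pos hb, if_neg hne]
    split_ifs <;> simp [hc]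
  · rw [if_neg hb]

lemma pvTerm_append_ne (p : List Int) (t a k : Int) (hka : k ≠ a)
    (hkb : k ≠ PySem.Int.bxor a t) : pvTerm (p ++ [a]) t k = pvTerm p t k := by
  have h1 : PySem.Int.bxor k t ≠ a := by
    intro h
    exact hkb ((pv_bxor_eq_comm k a t).mpr h.symm)
  have hmem : (PySem.Int.bxor k t ∈ p ++ [a]) ↔ PySem.Int.bxor k t ∈ p := by
    simp [List.mem_append, h1]
  have hc1 : (p ++ [a]).count k = p.count k := by
    simp [List.count_append, Ne.symm hka]
  have hc2 : (p ++ [a]).count (PySem.Int.bxor k t) = p.count (PySem.Int.bxor k t) := by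
    simp [List.count_append, Ne.symm h1]
  simp only [pvTerm, hmem, hc1, hc2]

lemma pv_sum_two (S : Finset Int) (d : Int → Int) (a b : Int)
    (h : ∀ x ∈ S, x ≠ a → x ≠ b → d x = 0) :
    (∑ x ∈ S, d x) = (if a ∈ S then d a else 0) + (if b ∈ S ∧ b ≠ a then d b else 0) := by
  by_cases hba : b = a
  · subst hba
    have : (∑ x ∈ S, d x) = ∑ x ∈ S, (if x = b then d x else 0) := by
      refine Finset.sum_congr rfl (fun x hx => ?_)
      by_cases hxb : x = b
      · simp [hxb]
      · simp [hxb, h x hx hxb hxb]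
    rw [this, Finset.sum_ite_eq']
    simp
  · have : (∑ x ∈ S, d x)
        = ∑ x ∈ S, ((if x = a then d x else 0) + (if x = b then d x else 0)) := by
      refine Finset.sum_congr rfl (fun x hx => ?_)
      by_cases hxa : x = a
      · subst hxa; simp [Ne.symm hba]
      · by_cases hxb : x = b
        · subst hxb; simp [hba]
        · simp [hxa, hxb, h x hx hxa hxb]
    rw [this, Finset.sum_add_distrib, Finset.sum_ite_eq', Finset.sum_ite_eq']
    by_cases hbS : b ∈ S <;> simp [hbS, hba]
  
lemma pvSum_append (p : List Int) (a t : Int) :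
    pvSum (p ++ [a]) t = pvSum p t + (p.count (PySem.Int.bxor a t) : Int) := by
  have hfin : ∀ (l : List Int) (f : Int → Int),
      ((PySem.List.dedup l).map f).sum = ∑ x ∈ l.toFinset, f x := by
    intro l f
    rw [← List.sum_toFinset f (PySem.List.nodup_dedup l)]
    congr 1
    ext x
    simp [List.mem_toFinset]
  unfold pvSum
  rw [hfin, hfin]
  have hS : (p ++ [a]).toFinset = insert a p.toFinset := by
    ext x
    simp [List.mem_toFinset]
  have hP : ∑ x ∈ p.toFinset, pvTerm p t x = ∑ x ∈ insert a p.toFinset, pvTerm p t x := by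
    by_cases hap : a ∈ p
    · rw [Finset.insert_eq_self.mpr (List.mem_toFinset.mpr hap)]
    · rw [Finset.sum_insert (fun h => hap (List.mem_toFinset.mp h)),
        pvTerm_not_mem p t a hap, zero_add]
  rw [hS, hP, ← sub_eq_iff_eq_add', ← Finset.sum_sub_distrib]
  have hsupp : ∀ x ∈ insert a p.toFinset, x ≠ a → x ≠ PySem.Int.bxor a t →
      pvTerm (p ++ [a]) t x - pvTerm p t x = 0 := by
    intro x _ hxa hxb
    rw [pvTerm_append_ne p t a x hxa hxb, sub_self]
  rw [pv_sum_two _ _ a (PySem.Int.bxor a t) hsupp, if_pos (Finset.mem_insert_self a _)]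
  have hca : ((p ++ [a]).count a : Int) = (p.count a : Int) + 1 := by
    simp [List.count_append]
  have hmema : a ∈ p ++ [a] := List.mem_append_right _ (List.mem_singleton.mpr rfl)
  by_cases ht : t = 0
  · -- here the key a pairs with itself: only the C(k,2) term at key a changes
    subst ht
    have hb : PySem.Int.bxor a 0 = a := PySem.Int.bxor_zero a
    rw [hb]
    rw [if_neg (fun h => h.2 rfl), add_zero]
    simp only [pvTerm, hb, if_pos hmema, if_true]
    by_cases hap : a ∈ p
    · rw [if_pos hap, hca]
      have e : ((p.count a : Int) + 1 - 1) = (p.count a : Int) := by ring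
      rw [e, pv_fd_step]
      ring
    · have hc0 : (List.count a p : Int) = 0 := by
        simp [List.count_eq_zero.mpr hap]
      rw [if_neg hap, hca, hc0]
      decide
  · -- t ≠ 0: the two affected keys a and b = a xor t are distinct
    have hba : PySem.Int.bxor a t ≠ a := fun h => ht ((pv_bxor_eq_self a t).mp h.symm)
    have hcan : PySem.Int.bxor (PySem.Int.bxor a t) t = a := pv_bxor_cancel a t
    have hcb : ((p ++ [a]).count (PySem.Int.bxor a t) : Int)
        = (p.count (PySem.Int.bxor a t) : Int) := by
      simp [List.count_append, Ne.symm hba]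
    have hmemb : (PySem.Int.bxor a t ∈ p ++ [a]) ↔ PySem.Int.bxor a t ∈ p := by
      simp [List.mem_append, hba]
    have hbS : (PySem.Int.bxor a t ∈ insert a p.toFinset) ↔ PySem.Int.bxor a t ∈ p := by
      simp [Finset.mem_insert, List.mem_toFinset, hba]
    rcases lt_trichotomy a (PySem.Int.bxor a t) with hlt | heq | hgt
    · -- a < b: only the term at key a changes, by count b
      have hta : pvTerm (p ++ [a]) t a - pvTerm p t a
          = (p.count (PySem.Int.bxor a t) : Int) := by
        simp only [pvTerm, hmemb, hca, hcb]
        by_cases hbp : PySem.Int.bxor a t ∈ p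
        · rw [if_pos hbp, if_pos hbp, if_neg (Ne.symm hba), if_neg (Ne.symm hba),
            if_pos hlt, if_pos hlt]
          ring
        · rw [if_neg hbp, if_neg hbp]
          have : p.count (PySem.Int.bxor a t) = 0 := List.count_eq_zero.mpr hbp
          simp [this]
      rw [hta]
      by_cases hbp : PySem.Int.bxor a t ∈ p
      · rw [if_pos ⟨hbS.mpr hbp, hba⟩]
        have htb : pvTerm (p ++ [a]) t (PySem.Int.bxor a t)
            - pvTerm p t (PySem.Int.bxor a t) = 0 := by
          simp only [pvTerm, hcan]
          rw [if_pos hmema, if_neg hba, if_neg (not_lt.mpr (le_of_lt hlt))]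
          by_cases hap : a ∈ p
          · rw [if_pos hap, if_neg hba, if_neg (not_lt.mpr (le_of_lt hlt))]; ring
          · rw [if_neg hap]; ring
        rw [htb]; ring
      · rw [if_neg (fun h => hbp (hbS.mp h.1)), add_zero]
    · exact absurd heq.symm hba
    · -- b < a: only the term at key b changes, by count b
      have hta : pvTerm (p ++ [a]) t a - pvTerm p t a = 0 := by
        simp only [pvTerm, hmemb]
        by_cases hbp : PySem.Int.bxor a t ∈ p
        · rw [if_pos hbp, if_pos hbp, if_neg (Ne.symm hba), if_neg (Ne.symm hba),
            if_neg (not_lt.mpr (le_of_lt hgt)), if_neg (not_lt.mpr (le_of_lt hgt))]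
          ring
        · rw [if_neg hbp, if_neg hbp]; ring
      rw [hta]
      by_cases hbp : PySem.Int.bxor a t ∈ p
      · rw [if_pos ⟨hbS.mpr hbp, hba⟩]
        have htb : pvTerm (p ++ [a]) t (PySem.Int.bxor a t)
            - pvTerm p t (PySem.Int.bxor a t)
            = (p.count (PySem.Int.bxor a t) : Int) := by
          simp only [pvTerm, hcan, hca, hcb]
          rw [if_pos hmema, if_neg hba, if_pos hgt]
          by_cases hap : a ∈ p
          · rw [if_pos hap, if_neg hba, if_pos hgt]; ring
          · rw [if_neg hap]
            have : p.count a = 0 := List.count_eq_zero.mpr hap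
            simp [this]
        rw [htb]; ring
      · have : p.count (PySem.Int.bxor a t) = 0 := List.count_eq_zero.mpr hbp
        rw [if_neg (fun h => hbp (hbS.mp h.1)), this]
        norm_num

lemma pvSum_eq_PC (t : Int) (p : List Int) : pvSum p t = pvPC t p := by
  induction p using List.reverseRecOn with
  | nil => simp [pvSum, pvPC, PySem.List.dedup]
  | append_singleton p a ih => rw [pvSum_append, pvPC_append, ih]

lemma pvA_foldl (freq : PySem.Dict Int Int) (target : Int) (K : List Int) (c : Int) :
    K.foldl (fun count num =>
      let xor_pair := PySem.Int.bxor num target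
      if freq.contains xor_pair then
        if num = xor_pair then
          count + PySem.Int.floordiv (freq.getD num 0 * (freq.getD num 0 - 1)) 2
        else if num < xor_pair then
          count + freq.getD num 0 * freq.getD xor_pair 0
        else count
      else count) c
    = c + (K.map (fun num =>
      if freq.contains (PySem.Int.bxor num target) then
        if num = PySem.Int.bxor num target then
          PySem.Int.floordiv (freq.getD num 0 * (freq.getD num 0 - 1)) 2
        else if num < PySem.Int.bxor num target then
          freq.getD num 0 * freq.getD (PySem.Int.bxor num target) 0
        else 0
      else 0)).sum := by
  induction K generalizing c with
  | nil => simp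
  | cons x xs ih =>
    simp only [List.foldl_cons, List.map_cons, List.sum_cons, ih]
    split_ifs <;> ring

lemma pvA_eq_sum (arr : List Int) (t : Int) : count_xor_pairs arr t = pvSum arr t := by
  simp only [count_xor_pairs]
  rw [pvA_foldl, PySem.Dict.keys_counter, ← PySem.List.dedup_eq_ofList, zero_add]
  unfold pvSum
  refine congrArg List.sum (List.map_congr_left (fun k _ => ?_))
  simp only [pvTerm, PySem.Dict.getD_counter, PySem.Dict.contains_counter]
  by_cases h : PySem.Int.bxor k t ∈ arr <;>
    simp [h]

lemma pvB_fold (t : Int) (rest : List Int) : ∀ (p : List Int) (c : Int),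
    (rest.foldl (fun (st : Int × PySem.Dict Int Int) num =>
        (st.1 + st.2.getD (PySem.Int.bxor num t) 0, st.2.modify num 0 (fun v => v + 1)))
      (c, PySem.Dict.counter p)).1 = c + pvPC t (p ++ rest) - pvPC t p := by
  induction rest with
  | nil => intro p c; simp
  | cons x rs ih =>
    intro p c
    simp only [List.foldl_cons]
    rw [show (PySem.Dict.counter p).modify x 0 (fun v => v + 1) = PySem.Dict.counter (p ++ [x])
      from (PySem.Dict.counter_append_singleton p x).symm]
    rw [PySem.Dict.getD_counter, ih (p ++ [x]), pvPC_append,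
      show p ++ [x] ++ rs = p ++ x :: rs by simp]
    ring

lemma pvB_eq_PC (arr : List Int) (t : Int) : count_xor_pairs_alt arr t = pvPC t arr := by
  simp only [count_xor_pairs_alt]
  rw [show (PySem.Dict.empty : PySem.Dict Int Int) = PySem.Dict.counter ([] : List Int) from rfl,
    pvB_fold t arr [] 0]
  simp [pvPC]

-- ===== VERDICT (by name: the statement is the Claim_ definition above) =====
theorem count_xor_pairs_spec : Claim_equal_count_xor_pairs := by
  intro arr target _
  unfold Spec_count_xor_pairs
  rw [pvA_eq_sum, pvSum_eq_PC, ← pvB_eq_PC]
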